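-- pv_equiv track=rewrite | github.com/zzaakiirr/sublime-gitlab-ee-prepend-mod | EePrependMod.py | build_prepended_module_skeleton
-- ===== SOURCE A (Python) =====
-- def build_prepended_module_skeleton(klass_name):
--     skeleton = '# frozen_string_literal: true\n\n'
--     namespaces = ['EE'] + klass_name.split('::')
--     indent = 0
--
--     for namespace in namespaces:
--         skeleton += f"{indent * ' '}module {namespace}\n"
--         indent += 2
--
--     skeleton += f"{indent * ' '}extend ::Gitlab::Utils::Override\n"
--
--     while indent != 0:
--         indent -= 2
--         skeleton += f"{indent * ' '}end\n"
--
--     return skeleton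
-- ===== SOURCE B (Python) =====
-- def build_prepended_module_skeleton(klass_name):
--     def wrap(ns, indent):
--         if not ns:
--             return indent * ' ' + 'extend ::Gitlab::Utils::Override\n'
--         return (indent * ' ' + 'module ' + ns[0] + '\n'
--                 + wrap(ns[1:], indent + 2)
--                 + indent * ' ' + 'end\n')
--     return '# frozen_string_literal: true\n\n' + wrap(['EE'] + klass_name.split('::'), 0)
-- ===== Notes on version B (the rewrite author's own statement) =====
-- stated objective: simpler
-- what changed: Replaces the open-loop + mutable indent counter + separate close while-loop with one structural recursion over the namespace list that emits the module line, the wrapped body and the matching end line together.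
import Mathlib
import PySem

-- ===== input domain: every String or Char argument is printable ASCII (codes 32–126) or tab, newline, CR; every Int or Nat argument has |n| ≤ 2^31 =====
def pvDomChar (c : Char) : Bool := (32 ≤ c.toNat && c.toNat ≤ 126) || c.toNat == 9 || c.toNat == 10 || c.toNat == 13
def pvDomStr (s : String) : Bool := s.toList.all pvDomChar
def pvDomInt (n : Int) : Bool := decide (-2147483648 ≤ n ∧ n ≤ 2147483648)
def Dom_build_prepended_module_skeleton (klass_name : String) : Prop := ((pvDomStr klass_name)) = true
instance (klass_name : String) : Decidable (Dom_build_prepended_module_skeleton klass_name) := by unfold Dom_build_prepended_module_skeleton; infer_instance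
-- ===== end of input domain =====

-- B replaces A's open-loop + mutable indent + separate close while-loop with one
-- structural recursion over the namespace list (objective: simpler).

-- ===== PORT A =====
-- indent * ' '
def pvSpaces (n : Nat) : String := String.ofList (List.replicate n ' ')

-- the 'while indent != 0' close loop (indent is decremented before the append, as in A)
def pvEndLoop (indent : Nat) (skeleton : String) : String :=
  if indent = 0 then skeleton
  else pvEndLoop (indent - 2) (skeleton ++ pvSpaces (indent - 2) ++ "end\n")

-- the body of the for-loop: append the module line, bump the indent
def pvFoldF : String × Nat → String → String × Nat :=
  fun acc namespace_ => (acc.1 ++ pvSpaces acc.2 ++ "module " ++ namespace_ ++ "\n", acc.2 + 2)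

def build_prepended_module_skeleton (klass_name : String) : String :=
  let skeleton := "# frozen_string_literal: true\n\n"
  let namespaces := "EE" :: ((PySem.Str.split? klass_name "::").getD [])
  let p := namespaces.foldl pvFoldF (skeleton, 0)
  let skeleton := p.1 ++ pvSpaces p.2 ++ "extend ::Gitlab::Utils::Override\n"
  pvEndLoop p.2 skeleton

-- ===== PORT B =====
def pvWrap (ns : List String) (indent : Nat) : String :=
  match ns with
  | [] => pvSpaces indent ++ "extend ::Gitlab::Utils::Override\n"
  | h :: t =>
      pvSpaces indent ++ "module " ++ h ++ "\n"
        ++ pvWrap t (indent + 2)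
        ++ pvSpaces indent ++ "end\n"

def build_prepended_module_skeleton_alt (klass_name : String) : String :=
  "# frozen_string_literal: true\n\n"
    ++ pvWrap ("EE" :: ((PySem.Str.split? klass_name "::").getD [])) 0

-- ===== PRECONDITION & SPEC =====
def Spec_build_prepended_module_skeleton (klass_name : String) (out : String) : Prop := out = build_prepended_module_skeleton_alt klass_name
instance (klass_name : String) (out : String) : Decidable (Spec_build_prepended_module_skeleton klass_name out) := by unfold Spec_build_prepended_module_skeleton; infer_instance

-- ===== CLAIM (what is proved, stated in full; the proofs are below) =====
def Claim_equal_build_prepended_module_skeleton : Prop := ∀ (klass_name : String), Dom_build_prepended_module_skeleton klass_name → Spec_build_prepended_module_skeleton klass_name (build_prepended_module_skeleton klass_name)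

-- ===== LEMMAS AND PROOFS =====

-- the block of 'end' lines with indents i+2*(n-1), …, i+2, i (top-peel form)
def pvEnds (n : Nat) (i : Nat) : String :=
  match n with
  | 0 => ""
  | n + 1 => pvSpaces (i + 2 * n) ++ "end\n" ++ pvEnds n i

lemma pvFold_snd (ns : List String) (pre : String) (i : Nat) :
    (List.foldl pvFoldF (pre, i) ns).2 = i + 2 * ns.length := by
  induction ns generalizing pre i with
  | nil => simp
  | cons h t ih =>
      simp only [List.foldl, pvFoldF, List.length_cons]
      rw [ih]; ring

-- bottom-peel form of pvEnds
lemma pvEnds_bottom (n i : Nat) :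
    pvEnds (n + 1) i = pvEnds n (i + 2) ++ pvSpaces i ++ "end\n" := by
  induction n generalizing i with
  | zero => simp [pvEnds]
  | succ n ih =>
      conv_lhs => rw [pvEnds]
      rw [ih]
      show _ = pvEnds (n + 1) (i + 2) ++ _ ++ _
      rw [pvEnds]
      have : i + 2 * (n + 1) = (i + 2) + 2 * n := by ring
      rw [this]
      simp [String.append_assoc]

lemma pvEndLoop_ends (n : Nat) (s : String) :
    pvEndLoop (2 * n) s = s ++ pvEnds n 0 := by
  induction n generalizing s with
  | zero => simp [pvEndLoop, pvEnds]
  | succ n ih =>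
      rw [pvEndLoop]
      have h1 : 2 * (n + 1) ≠ 0 := by omega
      have h2 : 2 * (n + 1) - 2 = 2 * n := by omega
      simp only [h1, if_false, h2, ih]
      rw [pvEnds]
      have : 0 + 2 * n = 2 * n := by omega
      rw [this]
      simp [String.append_assoc]

lemma pvCore (ns : List String) (pre : String) (i : Nat) :
    (List.foldl pvFoldF (pre, i) ns).1 ++ pvSpaces (i + 2 * ns.length)
      ++ "extend ::Gitlab::Utils::Override\n" ++ pvEnds ns.length i
    = pre ++ pvWrap ns i := by
  induction ns generalizing pre i with
  | nil => simp [pvWrap, pvEnds, String.append_assoc]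
  | cons h t ih =>
      simp only [List.foldl, pvFoldF, List.length_cons]
      rw [pvEnds_bottom]
      have harr : i + 2 * (t.length + 1) = (i + 2) + 2 * t.length := by ring
      rw [harr]
      have := ih (pre ++ pvSpaces i ++ "module " ++ h ++ "\n") (i + 2)
      rw [pvWrap]
      rw [← String.append_assoc, ← String.append_assoc, this]
      simp [String.append_assoc]

-- ===== VERDICT (by name: the statement is the Claim_ definition above) =====
theorem build_prepended_module_skeleton_spec : Claim_equal_build_prepended_module_skeleton := by
  intro klass_name _
  unfold Spec_build_prepended_module_skeleton
  unfold build_prepended_module_skeleton build_prepended_module_skeleton_alt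
  simp only []
  set ns := "EE" :: ((PySem.Str.split? klass_name "::").getD []) with hns
  have hsnd := pvFold_snd ns "# frozen_string_literal: true\n\n" 0
  have : (List.foldl pvFoldF ("# frozen_string_literal: true\n\n", 0) ns).2 = 2 * ns.length := by
    rw [hsnd]; omega
  show pvEndLoop (List.foldl pvFoldF _ ns).2 _ = _
  rw [this, pvEndLoop_ends]
  have := pvCore ns "# frozen_string_literal: true\n\n" 0
  rw [show (0 : Nat) + 2 * ns.length = 2 * ns.length from by omega] at this
  rw [String.append_assoc, String.append_assoc] at this ⊢
  exact this
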